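-- pv_equiv track=rewrite | github.com/stoneG/Slam_Tracker | WinLossChecker.py | slam_win_rec
-- ===== SOURCE A (Python) =====
-- OUTCOME = ['1R', '2R', '3R', '4R', 'QF', 'SF', 'F', 'W']
--
-- def slam_win_rec(li):
--     """ Given a list of rounds, return slam win-loss record"""
--     W = 0
--     total = 0
--     for stage in li:
--         if stage == 'W':
--             W += 1
--         if stage in OUTCOME:
--             total += 1
--     slamRec = str(W) + ' / ' + str(total)
--     return(slamRec)
-- ===== SOURCE B (Python) =====
-- OUTCOME = ['1R', '2R', '3R', '4R', 'QF', 'SF', 'F', 'W']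
--
-- def slam_win_rec(li):
--     """ Given a list of rounds, return slam win-loss record"""
--     c = {}
--     for stage in li:
--         c[stage] = c.get(stage, 0) + 1
--     total = sum(c.get(stage, 0) for stage in OUTCOME)
--     return str(c.get('W', 0)) + ' / ' + str(total)
-- ===== Notes on version B (the rewrite author's own statement) =====
-- stated objective: alternative
-- what changed: Replaces A's per-element conditional counting with a frequency table built in one pass, then reads 'W' and sums the counts of the fixed 8 OUTCOME stages.
import Mathlib
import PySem

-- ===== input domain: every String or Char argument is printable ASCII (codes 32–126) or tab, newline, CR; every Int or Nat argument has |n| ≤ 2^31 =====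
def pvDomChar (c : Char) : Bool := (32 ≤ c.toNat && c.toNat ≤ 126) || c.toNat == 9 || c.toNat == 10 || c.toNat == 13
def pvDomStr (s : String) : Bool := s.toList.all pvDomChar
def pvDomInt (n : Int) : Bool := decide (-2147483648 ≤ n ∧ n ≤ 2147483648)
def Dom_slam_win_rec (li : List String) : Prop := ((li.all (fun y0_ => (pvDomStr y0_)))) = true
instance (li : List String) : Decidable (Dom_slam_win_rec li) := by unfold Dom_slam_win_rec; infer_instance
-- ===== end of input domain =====

-- B builds a frequency table first, then sums the counts over the fixed OUTCOME stages (alternative shape, same cost).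

def OUTCOME : List String := ["1R", "2R", "3R", "4R", "QF", "SF", "F", "W"]

-- ===== PORT A =====
def slam_win_rec (li : List String) : String :=
  let st := li.foldl (fun (p : Int × Int) stage =>
    let p1 := if stage == "W" then (p.1 + 1, p.2) else p
    if OUTCOME.contains stage then (p1.1, p1.2 + 1) else p1) (0, 0)
  PySem.Int.toStr st.1 ++ " / " ++ PySem.Int.toStr st.2

-- ===== PORT B =====
def slam_win_rec_alt (li : List String) : String :=
  let c := li.foldl (fun (d : PySem.Dict String Int) stage =>
    d.insert stage (d.getD stage 0 + 1)) PySem.Dict.empty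
  let total := OUTCOME.foldl (fun (acc : Int) stage => acc + c.getD stage 0) 0
  PySem.Int.toStr (c.getD "W" 0) ++ " / " ++ PySem.Int.toStr total

-- ===== PRECONDITION & SPEC =====
def Spec_slam_win_rec (li : List String) (out : String) : Prop := out = slam_win_rec_alt li
instance (li : List String) (out : String) : Decidable (Spec_slam_win_rec li out) := by unfold Spec_slam_win_rec; infer_instance

-- ===== CLAIM (what is proved, stated in full; the proofs are below) =====
def Claim_equal_slam_win_rec : Prop := ∀ (li : List String), Dom_slam_win_rec li → Spec_slam_win_rec li (slam_win_rec li)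

-- ===== LEMMAS AND PROOFS =====

-- A's fold, characterised: it accumulates count of "W" and count of stages in OUTCOME.
theorem slam_A_fold (li : List String) (W T : Int) :
    li.foldl (fun (p : Int × Int) stage =>
      if OUTCOME.contains stage = true then
        ((if (stage == "W") = true then (p.1 + 1, p.2) else p).1,
          (if (stage == "W") = true then (p.1 + 1, p.2) else p).2 + 1)
      else if (stage == "W") = true then (p.1 + 1, p.2) else p) (W, T)
    = (W + li.count "W", T + li.countP (fun s => OUTCOME.contains s)) := by
  induction li generalizing W T with
  | nil => simp
  | cons x t ih =>
    rw [List.foldl_cons]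
    by_cases hw : (x == "W") = true
    · have ho : OUTCOME.contains x = true := by
        rw [beq_iff_eq] at hw; subst hw; decide
      rw [if_pos hw, if_pos ho, ih]
      rw [beq_iff_eq] at hw
      have ho' : x ∈ OUTCOME := by simpa using ho
      simp [List.count_cons, List.countP_cons, hw, ho', Prod.ext_iff, OUTCOME]
      push_cast
      omega
    · by_cases ho : OUTCOME.contains x = true
      · rw [if_neg hw, if_pos ho, ih]
        rw [beq_iff_eq] at hw
        have ho' : x ∈ OUTCOME := by simpa using ho
        simp [List.count_cons, List.countP_cons, hw, ho', Prod.ext_iff]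
        push_cast
        omega
      · rw [if_neg hw, if_neg ho, ih]
        rw [beq_iff_eq] at hw
        have ho' : x ∉ OUTCOME := by simpa using ho
        simp [List.count_cons, List.countP_cons, hw, ho', Prod.ext_iff]

-- the membership count equals the sum of the per-stage counts (OUTCOME has no duplicates)
theorem slam_sum_counts (li : List String) :
    (li.countP (fun s => (["1R", "2R", "3R", "4R", "QF", "SF", "F", "W"] : List String).contains s) : Int)
    = li.count "1R" + li.count "2R" + li.count "3R" + li.count "4R"
      + li.count "QF" + li.count "SF" + li.count "F" + li.count "W" := by
  induction li with
  | nil => simp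
  | cons x t ih =>
    simp only [List.countP_cons, List.count_cons]
    by_cases h1 : x = "1R" <;> by_cases h2 : x = "2R" <;> by_cases h3 : x = "3R" <;>
    by_cases h4 : x = "4R" <;> by_cases h5 : x = "QF" <;> by_cases h6 : x = "SF" <;>
    by_cases h7 : x = "F" <;> by_cases h8 : x = "W" <;>
      simp_all <;> push_cast [ih] <;> ring

-- ===== VERDICT (by name: the statement is the Claim_ definition above) =====
theorem slam_win_rec_spec : Claim_equal_slam_win_rec := by
  intro li _
  show slam_win_rec li = slam_win_rec_alt li
  simp only [slam_win_rec, slam_win_rec_alt,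
    PySem.Dict.foldl_insert_getD_add_one_eq_counter, slam_A_fold,
    PySem.Dict.getD_counter]
  have e1 : ((0 : Int) + li.count "W") = (li.count "W" : Int) := by ring
  have e2 : ((0 : Int) + li.countP (fun s => OUTCOME.contains s))
      = OUTCOME.foldl (fun (acc : Int) stage => acc + li.count stage) 0 := by
    simp only [OUTCOME, List.foldl]
    rw [slam_sum_counts]
    ring
  rw [e1, e2]
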